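-- pv_equiv track=rewrite | github.com/pavlosts/Challenge-375-Easy-Print-a-new-number-by-adding-one-to-each-of-its-digit | bonus.py | incNum
-- ===== SOURCE A (Python) =====
-- def incNum(num):
--   if num != 0:
--     result = incNum(num//10)
--   else:
--     return 0
--
--   if(num%10 == 9):
--     return result*100 + (num%10)+1
--   else:
--     return result*10 + (num%10)+1
-- ===== SOURCE B (Python) =====
-- def incNum(num):
--     digits = []
--     n = num
--     while n:
--         digits.append(n % 10)
--         n //= 10
--     out = 0
--     for d in reversed(digits):
--         out = out * (100 if d == 9 else 10) + d + 1
--     return out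
-- ===== Notes on version B (the rewrite author's own statement) =====
-- stated objective: alternative
-- what changed: Replaces A's bottom-up recursion (combine after the recursive call on num//10) with an explicit iterative two-phase pass: a while loop collecting the digits least-significant first, then a single left fold over the reversed digit list with an accumulator; no special case for 0 is needed and no recursion depth is consumed.
import Mathlib
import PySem

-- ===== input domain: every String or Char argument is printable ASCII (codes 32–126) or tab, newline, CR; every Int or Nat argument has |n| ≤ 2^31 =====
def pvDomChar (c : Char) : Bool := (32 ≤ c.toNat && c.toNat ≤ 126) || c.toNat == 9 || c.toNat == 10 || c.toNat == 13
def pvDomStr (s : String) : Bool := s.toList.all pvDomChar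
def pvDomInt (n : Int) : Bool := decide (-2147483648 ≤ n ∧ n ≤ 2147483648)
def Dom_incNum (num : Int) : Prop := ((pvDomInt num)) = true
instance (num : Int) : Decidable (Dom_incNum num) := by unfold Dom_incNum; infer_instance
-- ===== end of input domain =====

-- B replaces A's bottom-up recursion by an iterative digit-collecting loop plus a left fold (alternative decomposition, same cost).
-- Pre_ excludes num < 0, where the Python A recurses forever (RecursionError) and B's while loop never terminates.


-- ===== PORT A =====
-- Literal port of A's recursion. Python's `num != 0` branch recurses on num//10; for num < 0 that
-- recursion never terminates (outside Pre_), so the totalizing guard `0 < num` merges Python's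
-- `num == 0 → 0` base case with an arbitrary value (0) on the divergent negatives.
def incNum (num : Int) : Int :=
  if _h : 0 < num then
    let result := incNum (PySem.Int.floordiv num 10)
    if PySem.Int.mod num 10 = 9 then result * 100 + PySem.Int.mod num 10 + 1
    else result * 10 + PySem.Int.mod num 10 + 1
  else 0
termination_by num.toNat
decreasing_by
  rw [PySem.Int.floordiv_eq_ediv_of_pos (by norm_num : (0:Int) < 10)]
  omega

-- ===== PORT B =====
-- B's while loop `while n: digits.append(n % 10); n //= 10` (same totalizing guard on negatives,
-- where the Python loop never terminates — outside Pre_).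
def incNumDigits (n : Int) (digits : List Int) : List Int :=
  if _h : 0 < n then
    incNumDigits (PySem.Int.floordiv n 10) (digits ++ [PySem.Int.mod n 10])
  else digits
termination_by n.toNat
decreasing_by
  rw [PySem.Int.floordiv_eq_ediv_of_pos (by norm_num : (0:Int) < 10)]
  omega

-- B's second phase: `for d in reversed(digits): out = out * (100 if d == 9 else 10) + d + 1`.
def incNum_alt (num : Int) : Int :=
  (incNumDigits num []).reverse.foldl (fun out d => out * (if d = 9 then 100 else 10) + d + 1) 0

-- ===== PRECONDITION & SPEC =====
-- Pre_ excludes num < 0: there Python A hits the recursion limit (RecursionError) and never returns.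
def Pre_incNum (num : Int) : Prop := 0 ≤ num
instance (num : Int) : Decidable (Pre_incNum num) := by unfold Pre_incNum; infer_instance
def pvWitness_incNum : Int := 199

def Spec_incNum (num : Int) (out : Int) : Prop := out = incNum_alt num
instance (num : Int) (out : Int) : Decidable (Spec_incNum num out) := by unfold Spec_incNum; infer_instance

-- ===== CLAIM (what is proved, stated in full; the proofs are below) =====
def Claim_equal_incNum : Prop := ∀ (num : Int), Dom_incNum num → Pre_incNum num → Spec_incNum num (incNum num)

-- ===== LEMMAS AND PROOFS =====

-- One-step unfoldings of the digit loop.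
lemma incNumDigits_nonpos {n : Int} (h : ¬ 0 < n) (acc : List Int) :
    incNumDigits n acc = acc := by
  rw [incNumDigits]; simp [h]

lemma incNumDigits_pos {n : Int} (h : 0 < n) (acc : List Int) :
    incNumDigits n acc = incNumDigits (n / 10) (acc ++ [PySem.Int.mod n 10]) := by
  rw [incNumDigits]
  simp [h]

-- The digit loop's accumulator is just prepended output: incNumDigits n acc = acc ++ incNumDigits n [].
lemma incNumDigits_acc (k : Nat) : ∀ (n : Int), n.toNat ≤ k → ∀ (acc : List Int),
    incNumDigits n acc = acc ++ incNumDigits n [] := by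
  induction k with
  | zero =>
    intro n hn acc
    have h : ¬ 0 < n := by omega
    rw [incNumDigits_nonpos h, incNumDigits_nonpos h]
    simp
  | succ k ih =>
    intro n hn acc
    by_cases h : 0 < n
    · have hlt : (n / 10).toNat ≤ k := by omega
      rw [incNumDigits_pos h, incNumDigits_pos h ([]), ih (n / 10) hlt,
          ih (n / 10) hlt ([] ++ [PySem.Int.mod n 10])]
      simp
    · rw [incNumDigits_nonpos h, incNumDigits_nonpos h]
      simp

-- Main induction: A's recursion equals B's fold over the reversed digit list.
lemma incNum_eq_alt (k : Nat) : ∀ (n : Int), 0 ≤ n → n.toNat ≤ k → incNum n = incNum_alt n := by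
  induction k with
  | zero =>
    intro n h0 hn
    have hn0 : n = 0 := by omega
    subst hn0
    rw [incNum, incNum_alt, incNumDigits]
    norm_num
  | succ k ih =>
    intro n h0 hn
    by_cases h : 0 < n
    · have hdv : PySem.Int.floordiv n 10 = n / 10 :=
        PySem.Int.floordiv_eq_ediv_of_pos (by norm_num)
      have hq0 : 0 ≤ n / 10 := by omega
      have hqk : (n / 10).toNat ≤ k := by omega
      -- unfold B at n
      have hB : incNum_alt n
          = (incNum_alt (n / 10)) * (if PySem.Int.mod n 10 = 9 then 100 else 10)
            + PySem.Int.mod n 10 + 1 := by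
        rw [incNum_alt, incNumDigits_pos h,
            incNumDigits_acc (n / 10).toNat (n / 10) le_rfl ([] ++ [PySem.Int.mod n 10])]
        rw [incNum_alt]
        simp [List.foldl_append]
      rw [incNum]
      simp only [h, dif_pos, hdv]
      rw [hB, ih (n / 10) hq0 hqk]
      split_ifs with h9 <;> ring
    · have hn0 : n = 0 := by omega
      subst hn0
      rw [incNum, incNum_alt, incNumDigits]
      norm_num

-- ===== VERDICT (by name: the statement is the Claim_ definition above) =====
theorem incNum_spec : Claim_equal_incNum := by
  intro num _ hpre
  unfold Spec_incNum
  exact incNum_eq_alt num.toNat num hpre le_rfl
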